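-- pv_equiv track=rewrite | github.com/sunxiaoou/py | leetcode/math/exiv1618_patternMatching.py | patternMatching
-- ===== SOURCE A (Python) =====
-- def patternMatching(pattern: str, value: str) -> bool:
--     if not pattern:
--         return not value                # v "" matches p ""
--     if not value:
--         return len(pattern) == 1        # v "" matches p "a" or "b"
--     m, n = len(pattern), len(value)
--     ca = pattern.count("a")             # count of a
--     cb = m - ca                         # count of b
--     if not ca or not cb:
--         return value[: n // m] * m == value     # summary of parts equal entirety
--
--     for i in range((n + 1) // ca):              # try different length of a
--         j, r = divmod(n - i * ca, cb)
--         if r:                                   # not integer, illegal length of b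
--             continue                            # skip
--         sa, sb = set(), set()
--         k = 0
--         for ch in pattern:                      # split value to a and b
--             if ch == 'a':
--                 sa.add(value[k: k + i])
--                 k += i
--             else:
--                 sb.add(value[k: k + j])
--                 k += j
--         if len(sa) == len(sb) == 1:             # all a are same, all b are same
--             return True
--     return False
-- ===== SOURCE B (Python) =====
-- def patternMatching(pattern: str, value: str) -> bool:
--     if not pattern:
--         return not value                # v "" matches p ""
--     if not value:
--         return len(pattern) == 1        # v "" matches p "a" or "b"
--     m, n = len(pattern), len(value)
--     ca = pattern.count("a")             # count of a
--     cb = m - ca                         # count of non-a ("b")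
--     if not ca or not cb:
--         return value[: n // m] * m == value     # summary of parts equal entirety
--
--     fa = next(k for k, ch in enumerate(pattern) if ch == 'a')   # first a position
--     fb = next(k for k, ch in enumerate(pattern) if ch != 'a')   # first non-a position
--     for i in range((n + 1) // ca):              # try different length of a
--         j, r = divmod(n - i * ca, cb)
--         if r:                                   # not integer, illegal length of b
--             continue                            # skip
--         # reference blocks read directly off value: before the first 'a' there are
--         # exactly fa non-a blocks (length j each); before the first non-a, fb a-blocks
--         sa = value[fa * j: fa * j + i]
--         sb = value[fb * i: fb * i + j]
--         if "".join(sa if ch == 'a' else sb for ch in pattern) == value: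
--             return True
--     return False
-- ===== Notes on version B (the rewrite author's own statement) =====
-- stated objective: alternative
-- what changed: Instead of splitting value into two sets of blocks and testing that both sets are singletons, B reads the reference a- and b-blocks directly off value at closed-form offsets (fa*j and fb*i, from the first a / first non-a position of the pattern) and verifies a candidate length by rebuilding the whole string with join and comparing it to value.
import Mathlib
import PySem

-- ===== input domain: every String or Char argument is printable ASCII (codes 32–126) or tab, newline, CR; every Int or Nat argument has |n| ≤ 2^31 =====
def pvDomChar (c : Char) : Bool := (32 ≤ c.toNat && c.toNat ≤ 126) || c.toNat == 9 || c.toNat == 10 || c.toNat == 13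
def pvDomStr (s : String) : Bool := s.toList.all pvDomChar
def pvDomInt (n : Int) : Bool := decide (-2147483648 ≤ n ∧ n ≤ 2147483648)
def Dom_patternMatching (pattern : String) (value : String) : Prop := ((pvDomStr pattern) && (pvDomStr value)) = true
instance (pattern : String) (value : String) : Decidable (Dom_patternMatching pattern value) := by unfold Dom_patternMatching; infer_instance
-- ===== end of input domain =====

-- B verifies a candidate (a-length, b-length) by rebuilding the whole string from the two
-- reference blocks read off `value` at closed-form offsets, instead of A's two sets of blocks;
-- objective: alternative decomposition (same asymptotic cost).

-- ===== PORT A =====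
-- state of the inner 'for ch in pattern' loop: (sa, sb, k)
def pmStepA (V : List Char) (i j : Int)
    (st : PySem.Set (List Char) × PySem.Set (List Char) × Int) (ch : Char) :
    PySem.Set (List Char) × PySem.Set (List Char) × Int :=
  if ch == 'a' then
    (PySem.Set.add st.1 (PySem.List.slice V (some st.2.2) (some (st.2.2 + i))), st.2.1, st.2.2 + i)
  else
    (st.1, PySem.Set.add st.2.1 (PySem.List.slice V (some st.2.2) (some (st.2.2 + j))), st.2.2 + j)

-- 'for i in range((n+1)//ca): …' with early 'return True'
def pmLoopA (P V : List Char) (ca cb n : Int) : List Int → Bool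
  | [] => false
  | i :: rest =>
    let j := PySem.Int.floordiv (n - i * ca) cb
    let r := PySem.Int.mod (n - i * ca) cb
    if r ≠ 0 then pmLoopA P V ca cb n rest
    else
      let st := P.foldl (pmStepA V i j) (PySem.Set.empty, PySem.Set.empty, 0)
      if PySem.Set.len st.1 == PySem.Set.len st.2.1 && PySem.Set.len st.2.1 == 1 then true
      else pmLoopA P V ca cb n rest

def patternMatching (pattern : String) (value : String) : Bool :=
  let P := pattern.toList
  let V := value.toList
  if P.isEmpty then V.isEmpty
  else if V.isEmpty then P.length == 1
  else
    let m : Int := P.length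
    let n : Int := V.length
    let ca : Int := (PySem.Str.count pattern "a" : Int)
    let cb : Int := m - ca
    if ca == 0 || cb == 0 then
      PySem.List.pyRepeat (PySem.List.slice V none (some (PySem.Int.floordiv n m))) m == V
    else
      pmLoopA P V ca cb n (PySem.List.pyRange 0 (PySem.Int.floordiv (n + 1) ca) 1)

-- ===== PORT B =====
-- 'for i in range((n+1)//ca): …' of Source B: reference blocks + rebuild-and-compare
-- ("".join of the per-character generator is the concatenation, i.e. flatten)
def pmLoopB (P V : List Char) (ca cb n fa fb : Int) : List Int → Bool
  | [] => false
  | i :: rest =>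
    let j := PySem.Int.floordiv (n - i * ca) cb
    let r := PySem.Int.mod (n - i * ca) cb
    if r ≠ 0 then pmLoopB P V ca cb n fa fb rest
    else
      let sa := PySem.List.slice V (some (fa * j)) (some (fa * j + i))
      let sb := PySem.List.slice V (some (fb * i)) (some (fb * i + j))
      if (P.map (fun ch => if ch == 'a' then sa else sb)).flatten == V then true
      else pmLoopB P V ca cb n fa fb rest

def patternMatching_alt (pattern : String) (value : String) : Bool :=
  let P := pattern.toList
  let V := value.toList
  if P.isEmpty then V.isEmpty
  else if V.isEmpty then P.length == 1
  else
    let m : Int := P.length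
    let n : Int := V.length
    let ca : Int := (PySem.Str.count pattern "a" : Int)
    let cb : Int := m - ca
    if ca == 0 || cb == 0 then
      PySem.List.pyRepeat (PySem.List.slice V none (some (PySem.Int.floordiv n m))) m == V
    else
      -- next(k for k, ch in enumerate(pattern) if ch == 'a') = index of first match
      let fa : Int := (P.findIdx (fun c => c == 'a') : Int)
      let fb : Int := (P.findIdx (fun c => c != 'a') : Int)
      pmLoopB P V ca cb n fa fb (PySem.List.pyRange 0 (PySem.Int.floordiv (n + 1) ca) 1)

-- ===== PRECONDITION & SPEC =====
def Spec_patternMatching (pattern : String) (value : String) (out : Bool) : Prop := out = patternMatching_alt pattern value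
instance (pattern : String) (value : String) (out : Bool) : Decidable (Spec_patternMatching pattern value out) := by unfold Spec_patternMatching; infer_instance

-- ===== CLAIM (what is proved, stated in full; the proofs are below) =====
def Claim_equal_patternMatching : Prop := ∀ (pattern : String) (value : String), Dom_patternMatching pattern value → Spec_patternMatching pattern value (patternMatching pattern value)

-- ===== LEMMAS AND PROOFS =====

-- the block of value of length l starting at offset k
def pmSeg (V : List Char) (k l : Nat) : List Char := (V.drop k).take l

def pmW (i j : Nat) (c : Char) : Nat := if c = 'a' then i else j

def pmWeight (i j : Nat) (P : List Char) : Nat := (P.map (pmW i j)).sum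

-- the a-blocks / b-blocks the k-walk of A carves out of value
def pmABlocks (V : List Char) (i j : Nat) : List Char → Nat → List (List Char)
  | [], _ => []
  | c :: t, k => if c = 'a' then pmSeg V k i :: pmABlocks V i j t (k + i) else pmABlocks V i j t (k + j)

def pmBBlocks (V : List Char) (i j : Nat) : List Char → Nat → List (List Char)
  | [], _ => []
  | c :: t, k => if c = 'a' then pmBBlocks V i j t (k + i) else pmSeg V k j :: pmBBlocks V i j t (k + j)

theorem pmSeg_length (V : List Char) (k l : Nat) (h : k + l ≤ V.length) :
    (pmSeg V k l).length = l := by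
  simp [pmSeg]; omega

theorem pmWeight_cons (i j : Nat) (c : Char) (t : List Char) :
    pmWeight i j (c :: t) = pmW i j c + pmWeight i j t := by
  simp [pmWeight]

-- the slice V[k : k+l] for natural k, l is the segment
theorem pmSlice_cast (V : List Char) (k l : Nat) :
    PySem.List.slice V (some ((k : Int))) (some ((k : Int) + (l : Int))) = pmSeg V k l := by
  simpa [pmSeg] using PySem.List.slice_natCast_add (xs := V) (j := k) (n := l)

-- L1: the inner fold of A computes the two block sets and the final offset
theorem pmFoldA_eq (V : List Char) (i j : Nat) :
    ∀ (P : List Char) (sa sb : PySem.Set (List Char)) (k : Nat),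
      P.foldl (pmStepA V (i : Int) (j : Int)) (sa, sb, (k : Int)) =
        ((pmABlocks V i j P k).foldl PySem.Set.add sa,
         (pmBBlocks V i j P k).foldl PySem.Set.add sb,
         ((k + pmWeight i j P : Nat) : Int)) := by
  intro P
  induction P with
  | nil => intro sa sb k; simp [pmABlocks, pmBBlocks, pmWeight]
  | cons c t ih =>
    intro sa sb k
    by_cases hc : c = 'a'
    · subst hc
      simp only [List.foldl_cons, pmStepA, beq_self_eq_true, if_pos, pmSlice_cast]
      rw [show ((k : Int) + (i : Int)) = ((k + i : Nat) : Int) by push_cast; ring, ih]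
      simp [pmABlocks, pmBBlocks, pmWeight_cons, pmW]
      ring
    · have hcb : (c == 'a') = false := by simp [hc]
      simp only [List.foldl_cons, pmStepA, hcb, if_neg, Bool.false_eq_true, not_false_iff]
      rw [show ((k : Int) + (j : Int)) = ((k + j : Nat) : Int) by push_cast; ring, ih]
      simp [pmABlocks, pmBBlocks, pmWeight_cons, pmW, hc]
      constructor
      · rw [pmSlice_cast]
      · ring

-- nodup list with all elements equal and nonempty is a singleton
theorem pmNodupSingleton {α : Type} (l : List α) (u : α) (hn : l.Nodup) (hne : l ≠ [])
    (h : ∀ x ∈ l, x = u) : l = [u] := by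
  match l with
  | [] => exact absurd rfl hne
  | [x] => simp [h x (by simp)]
  | x :: y :: t =>
    have hx := h x (by simp); have hy := h y (by simp)
    simp [hx, hy] at hn

-- L2: set-of-list is a singleton iff the list is nonempty with all elements equal
theorem pmOfListSingleton (l : List (List Char)) (hne : l ≠ []) :
    (PySem.Set.ofList l).length = 1 ↔ ∀ x ∈ l, ∀ y ∈ l, x = y := by
  constructor
  · intro h x hx y hy
    obtain ⟨u, hu⟩ := List.length_eq_one_iff.mp h
    have hxu : x = u := by
      have := (PySem.Set.mem_ofList l x).mpr hx
      rw [hu] at this; simpa using this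
    have hyu : y = u := by
      have := (PySem.Set.mem_ofList l y).mpr hy
      rw [hu] at this; simpa using this
    rw [hxu, hyu]
  · intro h
    obtain ⟨x, t, rfl⟩ := List.exists_cons_of_ne_nil hne
    have hx : x ∈ PySem.Set.ofList (x :: t) := (PySem.Set.mem_ofList _ _).mpr (by simp)
    have := pmNodupSingleton (PySem.Set.ofList (x :: t)) x (PySem.Set.nodup_ofList _)
      (List.ne_nil_of_mem hx)
      (fun z hz => h z ((PySem.Set.mem_ofList _ _).mp hz) x (by simp))
    rw [this]; rfl

-- L4: tiling lemma — the rebuilt string equals the corresponding segment of value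
-- iff every block equals its reference block
theorem pmTile (V : List Char) (i j : Nat) (sa0 sb0 : List Char)
    (hla : sa0.length = i) (hlb : sb0.length = j) :
    ∀ (P : List Char) (k : Nat), k + pmWeight i j P ≤ V.length →
      ((P.map (fun c => if c == 'a' then sa0 else sb0)).flatten = pmSeg V k (pmWeight i j P)
        ↔ (∀ x ∈ pmABlocks V i j P k, x = sa0) ∧ (∀ x ∈ pmBBlocks V i j P k, x = sb0)) := by
  intro P
  induction P with
  | nil => intro k h; simp [pmABlocks, pmBBlocks, pmWeight, pmSeg]
  | cons c t ih =>
    intro k hk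
    by_cases hc : c = 'a'
    · subst hc
      have hW : pmWeight i j ('a' :: t) = i + pmWeight i j t := by simp [pmWeight_cons, pmW]
      have hk2 : (k + i) + pmWeight i j t ≤ V.length := by rw [hW] at hk; omega
      have hsplit : pmSeg V k (pmWeight i j ('a' :: t)) =
          pmSeg V k i ++ pmSeg V (k + i) (pmWeight i j t) := by
        rw [hW]; simp [pmSeg, List.take_add, List.drop_drop, Nat.add_comm]
      have hlen : sa0.length = (pmSeg V k i).length := by
        rw [pmSeg_length V k i (by omega)]; exact hla
      have hblA : pmABlocks V i j ('a' :: t) k = pmSeg V k i :: pmABlocks V i j t (k + i) := by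
        simp [pmABlocks]
      have hblB : pmBBlocks V i j ('a' :: t) k = pmBBlocks V i j t (k + i) := by
        simp [pmBBlocks]
      rw [hsplit, hblA, hblB, List.map_cons, List.flatten_cons, if_pos (by simp)]
      constructor
      · intro h
        obtain ⟨h1, h2⟩ := List.append_inj h hlen
        obtain ⟨ha, hb⟩ := (ih (k + i) hk2).mp h2
        exact ⟨fun x hx => by rcases List.mem_cons.mp hx with rfl | hx; exacts [h1.symm, ha x hx], hb⟩
      · rintro ⟨ha, hb⟩
        have h1 : pmSeg V k i = sa0 := ha _ (by simp)
        have h2 := (ih (k + i) hk2).mpr ⟨fun x hx => ha x (by simp [hx]), hb⟩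
        rw [h1, h2]
    · have hcb : (c == 'a') = false := by simp [hc]
      have hW : pmWeight i j (c :: t) = j + pmWeight i j t := by simp [pmWeight_cons, pmW, hc]
      have hk2 : (k + j) + pmWeight i j t ≤ V.length := by rw [hW] at hk; omega
      have hsplit : pmSeg V k (pmWeight i j (c :: t)) =
          pmSeg V k j ++ pmSeg V (k + j) (pmWeight i j t) := by
        rw [hW]; simp [pmSeg, List.take_add, List.drop_drop, Nat.add_comm]
      have hlen : sb0.length = (pmSeg V k j).length := by
        rw [pmSeg_length V k j (by omega)]; exact hlb
      have hblA : pmABlocks V i j (c :: t) k = pmABlocks V i j t (k + j) := by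
        simp [pmABlocks, hc]
      have hblB : pmBBlocks V i j (c :: t) k = pmSeg V k j :: pmBBlocks V i j t (k + j) := by
        simp [pmBBlocks, hc]
      rw [hsplit, hblA, hblB, List.map_cons, List.flatten_cons, if_neg (by simp [hc])]
      constructor
      · intro h
        obtain ⟨h1, h2⟩ := List.append_inj h hlen
        obtain ⟨ha, hb⟩ := (ih (k + j) hk2).mp h2
        exact ⟨ha, fun x hx => by rcases List.mem_cons.mp hx with rfl | hx; exacts [h1.symm, hb x hx]⟩
      · rintro ⟨ha, hb⟩
        have h1 : pmSeg V k j = sb0 := hb _ (by simp)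
        have h2 := (ih (k + j) hk2).mpr ⟨ha, fun x hx => hb x (by simp [hx])⟩
        rw [h1, h2]

-- L6: the block starting after the leading non-'a' run is one of the a-blocks
theorem pmFirstA (V : List Char) (i j : Nat) :
    ∀ (P : List Char) (k : Nat), 'a' ∈ P →
      pmSeg V (k + (P.takeWhile (fun c => c != 'a')).length * j) i ∈ pmABlocks V i j P k := by
  intro P
  induction P with
  | nil => intro k h; simp at h
  | cons c t ih =>
    intro k h
    by_cases hc : c = 'a'
    · subst hc
      simp [pmABlocks, List.takeWhile_cons]
    · have hmem : 'a' ∈ t := by rcases List.mem_cons.mp h with h' | h'; exacts [absurd h'.symm hc, h']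
      have htw : ((c :: t).takeWhile (fun c => c != 'a')).length =
          (t.takeWhile (fun c => c != 'a')).length + 1 := by
        simp [List.takeWhile_cons, hc]
      rw [htw, show k + ((t.takeWhile (fun c => c != 'a')).length + 1) * j =
          (k + j) + (t.takeWhile (fun c => c != 'a')).length * j by ring]
      simpa [pmABlocks, hc] using ih (k + j) hmem

theorem pmFirstB (V : List Char) (i j : Nat) :
    ∀ (P : List Char) (k : Nat), (∃ c ∈ P, c ≠ 'a') →
      pmSeg V (k + (P.takeWhile (fun c => c == 'a')).length * i) j ∈ pmBBlocks V i j P k := by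
  intro P
  induction P with
  | nil => intro k h; simp at h
  | cons c t ih =>
    intro k h
    by_cases hc : c = 'a'
    · subst hc
      have hmem : ∃ c ∈ t, c ≠ 'a' := by
        rcases h with ⟨x, hx, hxa⟩
        rcases List.mem_cons.mp hx with rfl | hx'; exacts [absurd rfl hxa, ⟨x, hx', hxa⟩]
      have htw : (('a' :: t).takeWhile (fun c => c == 'a')).length =
          (t.takeWhile (fun c => c == 'a')).length + 1 := by
        simp [List.takeWhile_cons]
      rw [htw, show k + ((t.takeWhile (fun c => c == 'a')).length + 1) * i =
          (k + i) + (t.takeWhile (fun c => c == 'a')).length * i by ring]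
      simpa [pmBBlocks] using ih (k + i) hmem
    · simp [pmBBlocks, hc, List.takeWhile_cons]

-- L7: findIdx is the length of the takeWhile of the negated predicate
theorem pmFindIdx_takeWhile {α : Type} (p : α → Bool) :
    ∀ l : List α, l.findIdx p = (l.takeWhile (fun c => !(p c))).length := by
  intro l
  induction l with
  | nil => simp
  | cons x t ih =>
    by_cases h : p x
    · simp [List.findIdx_cons, h]
    · simp [List.findIdx_cons, h, ih, List.takeWhile_cons]

theorem pmCountGo (c : Char) :
    ∀ (fuel : Nat) (l : List Char) (acc : Nat), l.length ≤ fuel →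
      PySem.Chars.count.go [c] fuel l acc = acc + l.count c := by
  intro fuel
  induction fuel with
  | zero =>
    intro l acc h
    have hl : l = [] := by cases l <;> simp_all
    subst hl; simp [PySem.Chars.count.go]
  | succ f ih =>
    intro l acc h
    cases l with
    | nil => simp [PySem.Chars.count.go]
    | cons x t =>
      rw [PySem.Chars.count.go]
      by_cases hx : x = c
      · subst hx
        simp only [List.isPrefixOf, beq_self_eq_true, Bool.true_and, List.isPrefixOf_nil_left,
          if_pos, List.length_cons, List.drop_succ_cons, List.drop_zero, List.length_nil]
        rw [ih t (acc + 1) (by simpa using h)]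
        simp [List.count_cons]; omega
      · have : ([c].isPrefixOf (x :: t)) = false := by
          simp [List.isPrefixOf]; exact fun hcx => absurd hcx.symm hx
        rw [this]
        simp only [Bool.false_eq_true, if_neg, not_false_iff]
        rw [ih t acc (by simpa using h)]
        simp [List.count_cons, hx]

-- L8: Python str.count of a single character is the character count
theorem pmCount_single (P : List Char) (c : Char) :
    PySem.Chars.count P [c] = P.count c := by
  rw [PySem.Chars.count]
  simp only [List.isEmpty_cons, if_neg, Bool.false_eq_true, not_false_iff]
  simpa using pmCountGo c P.length P 0 le_rfl

-- L11: total weight of the pattern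
theorem pmWeight_eq (i j : Nat) (P : List Char) :
    pmWeight i j P = P.count 'a' * i + P.countP (fun c => c != 'a') * j := by
  induction P with
  | nil => simp [pmWeight]
  | cons c t ih =>
    by_cases hc : c = 'a'
    · subst hc
      simp [pmWeight_cons, pmW, List.count_cons, List.countP_cons, ih]
      ring
    · simp [pmWeight_cons, pmW, List.count_cons, List.countP_cons, hc, ih]
      ring

-- length of leading run is at most the total count
theorem pmTakeWhile_le_countP {α : Type} (p : α → Bool) (l : List α) :
    (l.takeWhile p).length ≤ l.countP p := by
  induction l with
  | nil => simp
  | cons x t ih =>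
    by_cases hx : p x
    · simp [List.takeWhile_cons, hx, List.countP_cons]; omega
    · simp [List.takeWhile_cons, hx, List.countP_cons]

-- the heart: for an admissible candidate (i, j) the inner checks of A and of B agree
theorem pmInner (P V : List Char) (i j : Nat)
    (hca : 0 < P.count 'a') (hcb : 0 < P.countP (fun c => c != 'a'))
    (hn : i * P.count 'a' + j * P.countP (fun c => c != 'a') = V.length) :
    (let st := P.foldl (pmStepA V (i : Int) (j : Int)) (PySem.Set.empty, PySem.Set.empty, 0)
     (PySem.Set.len st.1 == PySem.Set.len st.2.1 && PySem.Set.len st.2.1 == 1))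
    =
    (let fa : Int := (P.findIdx (fun c => c == 'a') : Int)
     let fb : Int := (P.findIdx (fun c => c != 'a') : Int)
     let sa := PySem.List.slice V (some (fa * j)) (some (fa * j + i))
     let sb := PySem.List.slice V (some (fb * i)) (some (fb * i + j))
     ((P.map (fun ch => if ch == 'a' then sa else sb)).flatten == V)) := by
  have hmemA : 'a' ∈ P := List.count_pos_iff.mp hca
  have hmemB : ∃ c ∈ P, c ≠ 'a' := by
    rcases List.countP_pos_iff.mp hcb with ⟨c, hc, hcp⟩
    exact ⟨c, hc, by simpa using hcp⟩
  -- abbreviations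
  set faN := (P.takeWhile (fun c => c != 'a')).length with hfaN
  set fbN := (P.takeWhile (fun c => c == 'a')).length with hfbN
  set A := pmABlocks V i j P 0 with hA
  set B := pmBBlocks V i j P 0 with hB
  have hfa_le : faN ≤ P.countP (fun c => c != 'a') := pmTakeWhile_le_countP _ _
  have hfb_le : fbN ≤ P.count 'a' := by
    have h1 := pmTakeWhile_le_countP (fun c => c == 'a') P
    have h2 : P.countP (fun c => c == 'a') = P.count 'a' := (List.count_eq_countP).symm
    omega
  have hsa_bound : faN * j + i ≤ V.length := by
    calc faN * j + i ≤ P.countP (fun c => c != 'a') * j + P.count 'a' * i := by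
          have : i ≤ P.count 'a' * i := Nat.le_mul_of_pos_left i hca
          have := Nat.mul_le_mul_right j hfa_le
          omega
      _ = i * P.count 'a' + j * P.countP (fun c => c != 'a') := by ring
      _ = V.length := hn
  have hsb_bound : fbN * i + j ≤ V.length := by
    calc fbN * i + j ≤ P.count 'a' * i + P.countP (fun c => c != 'a') * j := by
          have : j ≤ P.countP (fun c => c != 'a') * j := Nat.le_mul_of_pos_left j hcb
          have := Nat.mul_le_mul_right i hfb_le
          omega
      _ = i * P.count 'a' + j * P.countP (fun c => c != 'a') := by ring
      _ = V.length := hn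
  have hsa_len : (pmSeg V (faN * j) i).length = i := pmSeg_length V _ i hsa_bound
  have hsb_len : (pmSeg V (fbN * i) j).length = j := pmSeg_length V _ j hsb_bound
  have hmemA' : pmSeg V (faN * j) i ∈ A := by
    simpa using pmFirstA V i j P 0 hmemA
  have hmemB' : pmSeg V (fbN * i) j ∈ B := by
    simpa using pmFirstB V i j P 0 hmemB
  -- the fold of port A
  have hfold : P.foldl (pmStepA V (i : Int) (j : Int)) (PySem.Set.empty, PySem.Set.empty, 0) =
      (PySem.Set.ofList A, PySem.Set.ofList B, ((pmWeight i j P : Nat) : Int)) := by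
    have := pmFoldA_eq V i j P PySem.Set.empty PySem.Set.empty 0
    simpa [PySem.Set.ofList_eq_foldl, PySem.Set.empty] using this
  -- the slices of port B
  have hslA : PySem.List.slice V (some ((P.findIdx (fun c => c == 'a') : Nat) * (j : Int)))
      (some ((P.findIdx (fun c => c == 'a') : Nat) * (j : Int) + (i : Int))) = pmSeg V (faN * j) i := by
    have hfi : P.findIdx (fun c => c == 'a') = faN := by
      rw [pmFindIdx_takeWhile, hfaN]; rfl
    rw [hfi, show ((faN : Int) * (j : Int)) = ((faN * j : Nat) : Int) by push_cast; ring,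
      pmSlice_cast]
  have hslB : PySem.List.slice V (some ((P.findIdx (fun c => c != 'a') : Nat) * (i : Int)))
      (some ((P.findIdx (fun c => c != 'a') : Nat) * (i : Int) + (j : Int))) = pmSeg V (fbN * i) j := by
    have hfi : P.findIdx (fun c => c != 'a') = fbN := by
      rw [pmFindIdx_takeWhile, hfbN]; simp only [bne, Bool.not_not]
    rw [hfi, show ((fbN : Int) * (i : Int)) = ((fbN * i : Nat) : Int) by push_cast; ring,
      pmSlice_cast]
  -- tiling: the rebuilt string equals value iff every block equals its reference
  have hWn : pmWeight i j P = V.length := by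
    rw [pmWeight_eq, Nat.mul_comm (P.count 'a') i,
      Nat.mul_comm (List.countP (fun c => c != 'a') P) j]
    exact hn
  have htile := pmTile V i j (pmSeg V (faN * j) i) (pmSeg V (fbN * i) j) hsa_len hsb_len P 0
    (by omega)
  have hseg0 : pmSeg V 0 (pmWeight i j P) = V := by
    rw [hWn]; simp [pmSeg]
  rw [hseg0] at htile
  simp only [← hA, ← hB] at htile
  -- now compare the two Boolean tests
  simp only [hfold, hslA, hslB]
  rw [Bool.eq_iff_iff]
  simp only [Bool.and_eq_true, beq_iff_eq]
  simp only [beq_iff_eq] at htile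
  constructor
  · rintro ⟨h1, h2⟩
    -- both sets are singletons → every block equals the reference block → rebuild succeeds
    have hlenA : (PySem.Set.ofList A).length = 1 := by
      have : PySem.Set.len (PySem.Set.ofList A) = PySem.Set.len (PySem.Set.ofList B) := h1
      have h2' : ((PySem.Set.ofList B).length : Int) = 1 := h2
      have h1' : ((PySem.Set.ofList A).length : Int) = ((PySem.Set.ofList B).length : Int) := this
      omega
    have hlenB : (PySem.Set.ofList B).length = 1 := by
      have h2' : ((PySem.Set.ofList B).length : Int) = 1 := h2
      omega
    have hallA := (pmOfListSingleton A (List.ne_nil_of_mem hmemA')).mp hlenA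
    have hallB := (pmOfListSingleton B (List.ne_nil_of_mem hmemB')).mp hlenB
    exact htile.mpr ⟨fun x hx => hallA x hx _ hmemA', fun x hx => hallB x hx _ hmemB'⟩
  · intro h
    obtain ⟨hallA, hallB⟩ := htile.mp h
    have hlenA : (PySem.Set.ofList A).length = 1 :=
      (pmOfListSingleton A (List.ne_nil_of_mem hmemA')).mpr
        (fun x hx y hy => by rw [hallA x hx, hallA y hy])
    have hlenB : (PySem.Set.ofList B).length = 1 :=
      (pmOfListSingleton B (List.ne_nil_of_mem hmemB')).mpr
        (fun x hx y hy => by rw [hallB x hx, hallB y hy])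
    constructor
    · show ((PySem.Set.ofList A).length : Int) = ((PySem.Set.ofList B).length : Int)
      rw [hlenA, hlenB]
    · show ((PySem.Set.ofList B).length : Int) = 1
      rw [hlenB]; rfl

-- the two loops agree element by element
theorem pmLoops (P V : List Char) (ca cb n : Int)
    (hca : ca = (P.count 'a' : Int)) (hcb : cb = (P.countP (fun c => c != 'a') : Int))
    (hn : n = (V.length : Int)) (hca0 : 0 < P.count 'a') (hcb0 : 0 < P.countP (fun c => c != 'a')) :
    ∀ L : List Int, (∀ x ∈ L, 0 ≤ x ∧ x * ca ≤ n) →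
      pmLoopA P V ca cb n L =
      pmLoopB P V ca cb n (P.findIdx (fun c => c == 'a') : Int) (P.findIdx (fun c => c != 'a') : Int) L := by
  intro L
  induction L with
  | nil => intro _; rfl
  | cons x rest ih =>
    intro hL
    have hx := hL x (List.mem_cons_self)
    have hrest := fun y hy => hL y (List.mem_cons_of_mem _ hy)
    have hi0 : 0 ≤ x := hx.1
    have hcbI : (0 : Int) < cb := by rw [hcb]; exact_mod_cast hcb0
    have hnum : 0 ≤ n - x * ca := by have := hx.2; rw [hn] at this ⊢; linarith
    have hArec : pmLoopA P V ca cb n (x :: rest) =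
        (if PySem.Int.mod (n - x * ca) cb ≠ 0 then pmLoopA P V ca cb n rest
         else
           if PySem.Set.len (P.foldl (pmStepA V x (PySem.Int.floordiv (n - x * ca) cb))
                 (PySem.Set.empty, PySem.Set.empty, 0)).1 ==
               PySem.Set.len (P.foldl (pmStepA V x (PySem.Int.floordiv (n - x * ca) cb))
                 (PySem.Set.empty, PySem.Set.empty, 0)).2.1 &&
               PySem.Set.len (P.foldl (pmStepA V x (PySem.Int.floordiv (n - x * ca) cb))
                 (PySem.Set.empty, PySem.Set.empty, 0)).2.1 == 1 then true
           else pmLoopA P V ca cb n rest) := rfl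
    have hBrec : pmLoopB P V ca cb n (P.findIdx (fun c => c == 'a') : Int) (P.findIdx (fun c => c != 'a') : Int) (x :: rest) =
        (if PySem.Int.mod (n - x * ca) cb ≠ 0 then
           pmLoopB P V ca cb n (P.findIdx (fun c => c == 'a') : Int) (P.findIdx (fun c => c != 'a') : Int) rest
         else
           if (P.map (fun ch => if ch == 'a'
                 then PySem.List.slice V (some ((P.findIdx (fun c => c == 'a') : Int) * PySem.Int.floordiv (n - x * ca) cb))
                   (some ((P.findIdx (fun c => c == 'a') : Int) * PySem.Int.floordiv (n - x * ca) cb + x))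
                 else PySem.List.slice V (some ((P.findIdx (fun c => c != 'a') : Int) * x))
                   (some ((P.findIdx (fun c => c != 'a') : Int) * x + PySem.Int.floordiv (n - x * ca) cb)))).flatten == V then true
           else pmLoopB P V ca cb n (P.findIdx (fun c => c == 'a') : Int) (P.findIdx (fun c => c != 'a') : Int) rest) := rfl
    rw [hArec, hBrec]
    by_cases hr : PySem.Int.mod (n - x * ca) cb = 0
    · have hdvd : cb ∣ (n - x * ca) := by
        apply Int.dvd_of_emod_eq_zero
        have hfm := Int.fmod_eq_emod (a := n - x * ca) (b := cb)
        rw [if_pos (Or.inl (le_of_lt hcbI)), add_zero] at hfm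
        rw [PySem.Int.mod] at hr
        rw [← hfm]; exact hr
      have hjediv : PySem.Int.floordiv (n - x * ca) cb = (n - x * ca) / cb := by
        rw [PySem.Int.floordiv, Int.fdiv_eq_ediv, if_pos (Or.inl (le_of_lt hcbI)), sub_zero]
      have hj0 : 0 ≤ PySem.Int.floordiv (n - x * ca) cb := by
        rw [hjediv]; exact Int.ediv_nonneg hnum (le_of_lt hcbI)
      have hjeq : PySem.Int.floordiv (n - x * ca) cb * cb = n - x * ca := by
        rw [hjediv]; exact Int.ediv_mul_cancel hdvd
      have hxi : x = (x.toNat : Int) := (Int.toNat_of_nonneg hi0).symm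
      have hxj : PySem.Int.floordiv (n - x * ca) cb = ((PySem.Int.floordiv (n - x * ca) cb).toNat : Int) :=
        (Int.toNat_of_nonneg hj0).symm
      have hNat : x.toNat * P.count 'a' + (PySem.Int.floordiv (n - x * ca) cb).toNat * P.countP (fun c => c != 'a') = V.length := by
        have hcast : ((x.toNat * P.count 'a' + (PySem.Int.floordiv (n - x * ca) cb).toNat * P.countP (fun c => c != 'a') : Nat) : Int) = (V.length : Int) := by
          push_cast
          rw [← hxi, ← hxj, ← hca, ← hcb, ← hn]
          linarith [hjeq]
        exact_mod_cast hcast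
      have hcheck := pmInner P V x.toNat (PySem.Int.floordiv (n - x * ca) cb).toNat hca0 hcb0 hNat
      rw [← hxi, ← hxj] at hcheck
      have hnr : ¬(PySem.Int.mod (n - x * ca) cb ≠ 0) := by simp [hr]
      rw [if_neg hnr, if_neg hnr, ih hrest, hcheck]
    · rw [if_pos hr, if_pos hr, ih hrest]

-- elements of the candidate range satisfy 0 ≤ i and i*ca ≤ n
theorem pmRangeBound (ca n : Int) (hca : 0 < ca) :
    ∀ x ∈ PySem.List.pyRange 0 (PySem.Int.floordiv (n + 1) ca) 1, 0 ≤ x ∧ x * ca ≤ n := by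
  intro x hx
  rw [PySem.List.mem_pyRange_one] at hx
  obtain ⟨h0, hlt⟩ := hx
  have hdiv : PySem.Int.floordiv (n + 1) ca = (n + 1) / ca := by
    rw [PySem.Int.floordiv, Int.fdiv_eq_ediv, if_pos (Or.inl (le_of_lt hca)), sub_zero]
  rw [hdiv] at hlt
  have h2 : (x + 1) * ca ≤ n + 1 := (Int.le_ediv_iff_mul_le hca).mp hlt
  rw [add_mul, one_mul] at h2
  exact ⟨h0, by linarith⟩

-- ===== VERDICT (by name: the statement is the Claim_ definition above) =====
-- length = count of 'a' + count of non-'a'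
theorem pmCountSplit (P : List Char) :
    P.length = P.count 'a' + P.countP (fun c => c != 'a') := by
  have h := List.length_eq_countP_add_countP (l := P) (fun c => c == 'a')
  have h1 : P.countP (fun c => c == 'a') = P.count 'a' := (List.count_eq_countP).symm
  have h2 : P.countP (fun a => decide ¬((a == 'a') = true)) = P.countP (fun c => c != 'a') := by
    apply List.countP_congr
    intro c _
    by_cases hc : c = 'a' <;> simp [hc]
  omega

theorem patternMatching_spec : Claim_equal_patternMatching := by
  intro pattern value _
  unfold Spec_patternMatching patternMatching patternMatching_alt
  by_cases hP : pattern.toList.isEmpty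
  · simp [hP]
  · simp only [hP, Bool.false_eq_true, if_neg, not_false_iff]
    by_cases hV : value.toList.isEmpty
    · simp [hV]
    · simp only [hV, Bool.false_eq_true, if_neg, not_false_iff]
      by_cases hg : (((PySem.Str.count pattern "a" : Nat) : Int) == 0 ||
          ((pattern.toList.length : Int) - ((PySem.Str.count pattern "a" : Nat) : Int)) == 0) = true
      · rw [if_pos hg, if_pos hg]
      · rw [if_neg hg, if_neg hg]
        have hcount : PySem.Str.count pattern "a" = pattern.toList.count 'a' := by
          rw [PySem.Str.count_eq]
          exact pmCount_single pattern.toList 'a'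
        simp only [Bool.or_eq_true, beq_iff_eq, not_or] at hg
        obtain ⟨hg1, hg2⟩ := hg
        have hca0 : 0 < pattern.toList.count 'a' := by
          rw [hcount] at hg1
          omega
        have hsplit := pmCountSplit pattern.toList
        have hcb0 : 0 < pattern.toList.countP (fun c => c != 'a') := by
          rw [hcount] at hg2
          by_contra h
          push_neg at h
          interval_cases h' : pattern.toList.countP (fun c => c != 'a') <;> omega
        have hcbeq : ((pattern.toList.length : Int) - ((PySem.Str.count pattern "a" : Nat) : Int)) =
            ((pattern.toList.countP (fun c => c != 'a') : Nat) : Int) := by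
          rw [hcount]; omega
        rw [hcbeq, hcount]
        exact pmLoops pattern.toList value.toList _ _ _ rfl rfl rfl hca0 hcb0 _
          (pmRangeBound _ _ (by exact_mod_cast hca0))
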